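-- pv_equiv track=rewrite | github.com/GitMonsters/octotetrahedral-agi | arc-puzzle-catalog/re-arc/solves/4b410a8c/solver.py | transform
-- ===== SOURCE A (Python) =====
-- def transform(input_grid):
--     from collections import Counter
--
--     rows = len(input_grid)
--     cols = len(input_grid[0])
--
--     # Find background color (most common)
--     flat = [c for row in input_grid for c in row]
--     bg = Counter(flat).most_common(1)[0][0]
--
--     # Find all non-background dots
--     dots = []
--     for r in range(rows):
--         for c in range(cols):
--             if input_grid[r][c] != bg:
--                 dots.append((r, c))
--
--     # Create output grid (all background)
--     output = [[bg] * cols for _ in range(rows)]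
--
--     # For each dot, place the 4 diagonal markers
--     for r, c in dots:
--         if r - 1 >= 0 and c - 1 >= 0:
--             output[r - 1][c - 1] = 0  # black
--         if r - 1 >= 0 and c + 1 < cols:
--             output[r - 1][c + 1] = 2  # red
--         if r + 1 < rows and c - 1 >= 0:
--             output[r + 1][c - 1] = 7  # orange
--         if r + 1 < rows and c + 1 < cols:
--             output[r + 1][c + 1] = 1  # blue
--
--     return output
-- ===== SOURCE B (Python) =====
-- def transform(input_grid):
--     from collections import Counter
--
--     rows = len(input_grid)
--     cols = len(input_grid[0])
--     bg = Counter(c for row in input_grid for c in row).most_common(1)[0][0]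
--
--     # gather formulation: a cell's color is decided by which diagonal neighbours
--     # are dots, with priority matching the scatter version's row-major overwrites
--     dotset = {(r, c) for r in range(rows) for c in range(cols)
--               if input_grid[r][c] != bg}
--
--     def color(r, c):
--         if (r + 1, c + 1) in dotset:
--             return 0
--         if (r + 1, c - 1) in dotset:
--             return 2
--         if (r - 1, c + 1) in dotset:
--             return 7
--         if (r - 1, c - 1) in dotset:
--             return 1
--         return bg
--
--     return [[color(r, c) for c in range(cols)] for r in range(rows)]
-- ===== Notes on version B (the rewrite author's own statement) =====
-- stated objective: alternative
-- what changed: Replaces the scatter pass that writes 4 diagonal markers per dot into a mutable grid (last row-major write wins) with a gather pass that builds a dot set once and computes each output cell directly from which of its 4 diagonal neighbours are dots, with a fixed priority reproducing the overwrite order.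
import Mathlib
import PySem

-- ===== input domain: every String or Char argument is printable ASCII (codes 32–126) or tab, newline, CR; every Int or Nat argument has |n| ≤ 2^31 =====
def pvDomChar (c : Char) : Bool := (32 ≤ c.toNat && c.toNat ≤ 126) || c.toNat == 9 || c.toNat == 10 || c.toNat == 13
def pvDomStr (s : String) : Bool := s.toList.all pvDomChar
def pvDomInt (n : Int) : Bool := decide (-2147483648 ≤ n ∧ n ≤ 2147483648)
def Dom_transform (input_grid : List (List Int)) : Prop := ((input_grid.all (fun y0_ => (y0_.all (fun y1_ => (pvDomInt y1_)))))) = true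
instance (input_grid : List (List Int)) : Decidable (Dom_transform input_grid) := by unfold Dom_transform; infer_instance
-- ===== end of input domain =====

-- B replaces A's scatter (write 4 diagonal markers per dot; last row-major write wins) by a
-- gather (one dot set; each cell reads its 4 diagonal neighbours with a fixed priority).

-- ===== PORT A =====
-- Counter(l).most_common(1)[0][0]: most_common is a stable descending sort of the counter's
-- items by count, so its first element is the first-inserted key of maximal count
-- = PySem.List.max? (first extremal) over the counter's items.

def pvMostCommon (l : List Int) : Int :=
  match PySem.List.max? (PySem.Dict.counter l).items (fun kv => kv.2) with
  | some kv => kv.1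
  | none => 0

-- A's `dots` loop: row-major list of non-background cells (B's set comprehension runs the
-- same nested ranges, so the helper is shared; B wraps it in PySem.Set.ofList)

def pvDots (g : List (List Int)) (bg : Int) : List (Int × Int) :=
  (List.range g.length).flatMap (fun r =>
    (List.range (g.headD []).length).filterMap (fun c =>
      if (g.getD r []).getD c 0 ≠ bg then some ((r : Int), (c : Int)) else none))

-- output[r][c] = v  (call sites guard 0 ≤ r, 0 ≤ c, so .toNat is exact)

def pvSetCell (o : List (List Int)) (r c : Int) (v : Int) : List (List Int) :=
  o.modify r.toNat (fun row => row.set c.toNat v)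

-- the body of A's `for r, c in dots` loop: four guarded diagonal writes

def pvStep (rows cols : Int) (o : List (List Int)) (rc : Int × Int) : List (List Int) :=
  let r := rc.1
  let c := rc.2
  let o1 := if 0 ≤ r - 1 ∧ 0 ≤ c - 1 then pvSetCell o (r-1) (c-1) 0 else o
  let o2 := if 0 ≤ r - 1 ∧ c + 1 < cols then pvSetCell o1 (r-1) (c+1) 2 else o1
  let o3 := if r + 1 < rows ∧ 0 ≤ c - 1 then pvSetCell o2 (r+1) (c-1) 7 else o2
  if r + 1 < rows ∧ c + 1 < cols then pvSetCell o3 (r+1) (c+1) 1 else o3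

def transform (input_grid : List (List Int)) : List (List Int) :=
  let rows := input_grid.length
  let cols := (input_grid.headD []).length
  let bg := pvMostCommon (input_grid.flatMap (fun row => row))
  let dots := pvDots input_grid bg
  let output := List.replicate rows (List.replicate cols bg)
  dots.foldl (pvStep (rows : Int) (cols : Int)) output

-- ===== PORT B =====

def transform_alt (input_grid : List (List Int)) : List (List Int) :=
  let rows := input_grid.length
  let cols := (input_grid.headD []).length
  let bg := pvMostCommon (input_grid.flatMap (fun row => row))
  let dotset : PySem.Set (Int × Int) := PySem.Set.ofList (pvDots input_grid bg)
  (List.range rows).map (fun (i : Nat) =>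
    (List.range cols).map (fun (j : Nat) =>
      if ((i : Int) + 1, (j : Int) + 1) ∈ dotset then (0 : Int)
      else if ((i : Int) + 1, (j : Int) - 1) ∈ dotset then 2
      else if ((i : Int) - 1, (j : Int) + 1) ∈ dotset then 7
      else if ((i : Int) - 1, (j : Int) - 1) ∈ dotset then 1
      else bg))

-- ===== PRECONDITION & SPEC =====
-- Pre_ excludes exactly the inputs on which Python A raises IndexError: the empty grid and
-- the all-rows-empty grid (`input_grid[0]` / `most_common(1)[0]`), and grids with a row
-- shorter than the first row (`input_grid[r][c]`).
def Pre_transform (input_grid : List (List Int)) : Prop :=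
  input_grid ≠ [] ∧
  (∀ row ∈ input_grid, (input_grid.headD []).length ≤ row.length) ∧
  input_grid.flatMap (fun row => row) ≠ []
instance (input_grid : List (List Int)) : Decidable (Pre_transform input_grid) := by
  unfold Pre_transform; infer_instance

def pvWitness_transform : List (List Int) := [[1, 1], [1, 2]]

def Spec_transform (input_grid : List (List Int)) (out : List (List Int)) : Prop :=
  out = transform_alt input_grid
instance (input_grid : List (List Int)) (out : List (List Int)) : Decidable (Spec_transform input_grid out) := by
  unfold Spec_transform; infer_instance

-- ===== CLAIM (what is proved, stated in full; the proofs are below) =====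
def Claim_equal_transform : Prop := ∀ (input_grid : List (List Int)), Dom_transform input_grid → Pre_transform input_grid → Spec_transform input_grid (transform input_grid)

-- ===== LEMMAS AND PROOFS =====

-- cell (i, j) of a grid, totalized (all reads in the proofs are in range)
def pvGet2 (o : List (List Int)) (i j : Nat) : Int := ((o[i]?.getD [])[j]?).getD 0

-- the grid has `rows` rows of `cols` cells each
def pvShape (rows cols : Nat) (o : List (List Int)) : Prop :=
  o.length = rows ∧ ∀ k : Nat, k < rows → (o[k]?.getD []).length = cols

-- row-major order on coordinates
def pvLexLT (p q : Int × Int) : Prop := p.1 < q.1 ∨ (p.1 = q.1 ∧ p.2 < q.2)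

-- the value dot p writes into cell (i, j), if any

def pvWval (i j : Nat) (p : Int × Int) : Option Int :=
  if p = ((i : Int) + 1, (j : Int) + 1) then some 0
  else if p = ((i : Int) + 1, (j : Int) - 1) then some 2
  else if p = ((i : Int) - 1, (j : Int) + 1) then some 7
  else if p = ((i : Int) - 1, (j : Int) - 1) then some 1
  else none

-- the value of the LAST dot in L that writes cell (i, j) (Python: last write wins)

def pvLastW (i j : Nat) : List (Int × Int) → Option Int
  | [] => none
  | p :: t =>
    match pvLastW i j t with
    | some v => some v
    | none => pvWval i j p

lemma pvShape_setCell {rows cols : Nat} {o : List (List Int)} (r c : Int) (v : Int)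
    (hs : pvShape rows cols o) : pvShape rows cols (pvSetCell o r c v) := by
  refine ⟨by simp [pvSetCell, hs.1], fun k hk => ?_⟩
  have h2 := hs.2 k hk
  rw [pvSetCell, List.getElem?_modify]
  cases h : o[k]? with
  | none => simp [h] at h2 ⊢; exact h2
  | some row => simp [h] at h2 ⊢; split_ifs <;> simp [h2]

lemma pvGet2_setCell {rows cols : Nat} {o : List (List Int)} {i j : Nat} (r c : Int) (v : Int)
    (hs : pvShape rows cols o) (hi : i < rows) (hj : j < cols) (hr : 0 ≤ r) (hc : 0 ≤ c) :
    pvGet2 (pvSetCell o r c v) i j = if r = (i : Int) ∧ c = (j : Int) then v else pvGet2 o i j := by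
  have hi' : i < o.length := hs.1 ▸ hi
  have hrow : o[i]? = some o[i] := List.getElem?_eq_getElem hi'
  have hlen : (o[i]).length = cols := by have := hs.2 i hi; rw [hrow] at this; simpa using this
  rw [pvGet2, pvSetCell, List.getElem?_modify]
  by_cases hri : r = (i : Int)
  · have : r.toNat = i := by omega
    rw [hrow]
    by_cases hcj : c = (j : Int)
    · have hcj' : c.toNat = j := by omega
      simp [List.getElem?_set_self (show j < (o[i]).length by omega), hri, hcj]
    · have hcj' : c.toNat ≠ j := by omega
      simp [List.getElem?_set_ne hcj', pvGet2, hri, hcj, hrow]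
  · have : r.toNat ≠ i := by omega
    rw [hrow]
    simp [this, pvGet2, hri, hrow]

lemma pvShape_guard {rows cols : Nat} {o : List (List Int)} (P : Prop) [Decidable P]
    (r c : Int) (v : Int) (hs : pvShape rows cols o) :
    pvShape rows cols (if P then pvSetCell o r c v else o) := by
  split_ifs with h
  · exact pvShape_setCell r c v hs
  · exact hs

lemma pvShape_step {rows cols : Nat} {o : List (List Int)} (p : Int × Int)
    (hs : pvShape rows cols o) : pvShape rows cols (pvStep (rows : Int) (cols : Int) o p) := by
  unfold pvStep
  exact pvShape_guard _ _ _ _ (pvShape_guard _ _ _ _ (pvShape_guard _ _ _ _ (pvShape_guard _ _ _ _ hs)))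

lemma pvGet2_guard {rows cols i j : Nat} {o : List (List Int)} (P : Prop) [Decidable P]
    (r c : Int) (v : Int) (hs : pvShape rows cols o) (hi : i < rows) (hj : j < cols)
    (hr : P → 0 ≤ r) (hc : P → 0 ≤ c) :
    pvGet2 (if P then pvSetCell o r c v else o) i j
      = if P ∧ r = (i : Int) ∧ c = (j : Int) then v else pvGet2 o i j := by
  by_cases hP : P
  · rw [if_pos hP, pvGet2_setCell r c v hs hi hj (hr hP) (hc hP)]
    by_cases htg : r = (i : Int) ∧ c = (j : Int) <;> simp [hP, htg]
  · simp [hP]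

lemma pvStep_get2 {rows cols : Nat} {o : List (List Int)} {i j : Nat} (p : Int × Int)
    (hs : pvShape rows cols o) (hi : i < rows) (hj : j < cols)
    (hp1 : 0 ≤ p.1) (hp2 : 0 ≤ p.2) :
    pvGet2 (pvStep (rows : Int) (cols : Int) o p) i j
      = (pvWval i j p).getD (pvGet2 o i j) := by
  obtain ⟨r, c⟩ := p
  simp only at hp1 hp2
  have hiR : (i : Int) < (rows : Int) := by exact_mod_cast hi
  have hjR : (j : Int) < (cols : Int) := by exact_mod_cast hj
  have h1 := pvShape_guard (o := o) (0 ≤ r - 1 ∧ 0 ≤ c - 1) (r-1) (c-1) 0 hs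
  have h2 := pvShape_guard (o := _) (0 ≤ r - 1 ∧ c + 1 < (cols:Int)) (r-1) (c+1) 2 h1
  have h3 := pvShape_guard (o := _) (r + 1 < (rows:Int) ∧ 0 ≤ c - 1) (r+1) (c-1) 7 h2
  unfold pvStep
  rw [pvGet2_guard _ _ _ _ h3 hi hj (fun h => by omega) (fun h => by omega),
      pvGet2_guard _ _ _ _ h2 hi hj (fun h => by omega) (fun h => by omega),
      pvGet2_guard _ _ _ _ h1 hi hj (fun h => by omega) (fun h => by omega),
      pvGet2_guard _ _ _ _ hs hi hj (fun h => by omega) (fun h => by omega)]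
  simp only [pvWval, Prod.mk.injEq]
  split_ifs <;> first | rfl | omega

lemma pvFold_get2 {rows cols : Nat} {i j : Nat} (L : List (Int × Int)) (o : List (List Int))
    (hs : pvShape rows cols o) (hi : i < rows) (hj : j < cols)
    (hL : ∀ p ∈ L, 0 ≤ p.1 ∧ 0 ≤ p.2) :
    pvGet2 (L.foldl (pvStep (rows : Int) (cols : Int)) o) i j
      = (pvLastW i j L).getD (pvGet2 o i j) := by
  induction L generalizing o with
  | nil => rfl
  | cons p t ih =>
    rw [List.foldl_cons, ih _ (pvShape_step p hs) (fun q hq => hL q (List.mem_cons_of_mem _ hq)),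
        pvStep_get2 p hs hi hj (hL p List.mem_cons_self).1 (hL p List.mem_cons_self).2]
    cases hw : pvLastW i j t <;> simp [pvLastW, hw]

lemma pvShape_fold {rows cols : Nat} (L : List (Int × Int)) (o : List (List Int))
    (hs : pvShape rows cols o) :
    pvShape rows cols (L.foldl (pvStep (rows : Int) (cols : Int)) o) := by
  induction L generalizing o with
  | nil => exact hs
  | cons p t ih => exact ih _ (pvShape_step p hs)

lemma pvMem_dots {g : List (List Int)} {bg : Int} {p : Int × Int} :
    p ∈ pvDots g bg ↔ ∃ r c : Nat, r < g.length ∧ c < (g.headD []).length ∧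
      p = ((r : Int), (c : Int)) ∧ (g.getD r []).getD c 0 ≠ bg := by
  simp only [pvDots, List.mem_flatMap, List.mem_filterMap, List.mem_range]
  constructor
  · rintro ⟨r, hr, c, hc, h⟩
    rw [Option.ite_none_right_eq_some] at h
    exact ⟨r, c, hr, hc, (Option.some.inj h.2).symm, h.1⟩
  · rintro ⟨r, c, hr, hc, rfl, hne⟩
    exact ⟨r, hr, c, hc, by rw [if_pos hne]⟩

lemma pvPairwise_dots (g : List (List Int)) (bg : Int) :
    (pvDots g bg).Pairwise pvLexLT := by
  rw [pvDots, List.pairwise_flatMap]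
  constructor
  · intro r _
    rw [List.pairwise_filterMap]
    apply List.Pairwise.imp ?_ (List.pairwise_lt_range)
    intro c c' hcc b hb b' hb'
    rw [Option.ite_none_right_eq_some] at hb hb'
    obtain ⟨-, hb⟩ := hb
    obtain ⟨-, hb'⟩ := hb'
    obtain rfl := Option.some.inj hb
    obtain rfl := Option.some.inj hb'
    exact Or.inr ⟨rfl, by show (c : Int) < (c' : Int); exact_mod_cast hcc⟩
  · apply List.Pairwise.imp ?_ (List.pairwise_lt_range)
    intro r r' hrr x hx y hy
    rw [List.mem_filterMap] at hx hy
    obtain ⟨c, -, hc⟩ := hx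
    obtain ⟨c', -, hc'⟩ := hy
    rw [Option.ite_none_right_eq_some] at hc hc'
    obtain ⟨-, hc⟩ := hc
    obtain ⟨-, hc'⟩ := hc'
    obtain rfl := Option.some.inj hc
    obtain rfl := Option.some.inj hc'
    exact Or.inl (by show (r : Int) < (r' : Int); exact_mod_cast hrr)

lemma pvLastW_eq {i j : Nat} (L : List (Int × Int)) (hL : L.Pairwise pvLexLT) :
    pvLastW i j L =
      if ((i : Int) + 1, (j : Int) + 1) ∈ L then some 0
      else if ((i : Int) + 1, (j : Int) - 1) ∈ L then some 2
      else if ((i : Int) - 1, (j : Int) + 1) ∈ L then some 7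
      else if ((i : Int) - 1, (j : Int) - 1) ∈ L then some 1
      else none := by
  induction L with
  | nil => rfl
  | cons p t ih =>
    obtain ⟨h1, h2⟩ := List.pairwise_cons.mp hL
    have iht := ih h2
    show (match pvLastW i j t with | some v => some v | none => pvWval i j p) = _
    by_cases hd0 : ((i : Int) + 1, (j : Int) + 1) ∈ t
    · simp [iht, hd0, List.mem_cons]
    · by_cases hd2 : ((i : Int) + 1, (j : Int) - 1) ∈ t
      · have hp := h1 _ hd2
        have hne0 : ((i : Int) + 1, (j : Int) + 1) ≠ p := by
          rintro rfl; simp [pvLexLT] at hp; omega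
        simp [iht, hd0, hd2, List.mem_cons, hne0]
      · by_cases hd7 : ((i : Int) - 1, (j : Int) + 1) ∈ t
        · have hp := h1 _ hd7
          have hne0 : ((i : Int) + 1, (j : Int) + 1) ≠ p := by
            rintro rfl; simp [pvLexLT] at hp; omega
          have hne2 : ((i : Int) + 1, (j : Int) - 1) ≠ p := by
            rintro rfl; simp [pvLexLT] at hp; omega
          simp [iht, hd0, hd2, hd7, List.mem_cons, hne0, hne2]
        · by_cases hd1 : ((i : Int) - 1, (j : Int) - 1) ∈ t
          · have hp := h1 _ hd1
            have hne0 : ((i : Int) + 1, (j : Int) + 1) ≠ p := by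
              rintro rfl; simp [pvLexLT] at hp; omega
            have hne2 : ((i : Int) + 1, (j : Int) - 1) ≠ p := by
              rintro rfl; simp [pvLexLT] at hp; omega
            have hne7 : ((i : Int) - 1, (j : Int) + 1) ≠ p := by
              rintro rfl; simp [pvLexLT] at hp; omega
            simp [iht, hd0, hd2, hd7, hd1, List.mem_cons, hne0, hne2, hne7]
          · simp only [iht, hd0, hd2, hd7, hd1, if_false, List.mem_cons, or_false,
              pvWval]
            simp [eq_comm]

theorem transform_eq (g : List (List Int)) : transform g = transform_alt g := by
  set rows := g.length with hrows
  set cols := (g.headD []).length with hcols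
  set bg := pvMostCommon (g.flatMap (fun row => row)) with hbg
  have hs0 : pvShape rows cols (List.replicate rows (List.replicate cols bg)) := by
    refine ⟨by simp, fun k hk => ?_⟩
    rw [List.getElem?_replicate, if_pos hk]
    simp
  have hnn : ∀ p ∈ pvDots g bg, 0 ≤ p.1 ∧ 0 ≤ p.2 := by
    intro p hp
    obtain ⟨r, c, -, -, rfl, -⟩ := pvMem_dots.mp hp
    exact ⟨Int.natCast_nonneg r, Int.natCast_nonneg c⟩
  have hsA : pvShape rows cols (transform g) := pvShape_fold _ _ hs0
  apply List.ext_getElem?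
  intro i
  by_cases hi : i < rows
  · have hAi : (transform g)[i]? = some ((transform g)[i]'(by rw [hsA.1]; exact hi)) :=
      List.getElem?_eq_getElem _
    have hBi : (transform_alt g)[i]? = some (((List.range cols).map (fun (j : Nat) =>
        if ((i:Int) + 1, (j:Int) + 1) ∈ PySem.Set.ofList (pvDots g bg) then 0
        else if ((i:Int) + 1, (j:Int) - 1) ∈ PySem.Set.ofList (pvDots g bg) then 2
        else if ((i:Int) - 1, (j:Int) + 1) ∈ PySem.Set.ofList (pvDots g bg) then 7
        else if ((i:Int) - 1, (j:Int) - 1) ∈ PySem.Set.ofList (pvDots g bg) then 1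
        else bg)) : List Int) := by
      rw [transform_alt]
      rw [List.getElem?_map, List.getElem?_range hi]
      rfl
    rw [hAi, hBi]
    congr 1
    have hlenA : ((transform g)[i]'(by rw [hsA.1]; exact hi)).length = cols := by
      have := hsA.2 i hi
      rw [hAi] at this
      simpa using this
    apply List.ext_getElem?
    intro j
    by_cases hj : j < cols
    · have hcell : pvGet2 (transform g) i j =
          (pvLastW i j (pvDots g bg)).getD bg := by
        rw [transform]
        rw [pvFold_get2 _ _ hs0 hi hj hnn]
        congr 1
        rw [pvGet2, List.getElem?_replicate, if_pos hi]
        simp [hj]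
      rw [List.getElem?_eq_getElem (by rw [hlenA]; exact hj),
          List.getElem?_eq_getElem (by simpa using hj)]
      congr 1
      have hAcell : ((transform g)[i]'(by rw [hsA.1]; exact hi))[j]'(by rw [hlenA]; exact hj)
          = pvGet2 (transform g) i j := by
        rw [pvGet2, hAi]
        simp [List.getElem?_eq_getElem (show j < ((transform g)[i]'(by rw [hsA.1]; exact hi)).length by rw [hlenA]; exact hj)]
      rw [hAcell, hcell, pvLastW_eq _ (pvPairwise_dots g bg)]
      simp only [List.getElem_map, List.getElem_range]
      simp only [PySem.Set.mem_ofList]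
      split_ifs <;> rfl
    · rw [List.getElem?_eq_none (by rw [hlenA]; omega),
          List.getElem?_eq_none (by simpa using hj)]
  · rw [List.getElem?_eq_none (by rw [hsA.1]; omega),
        List.getElem?_eq_none (by rw [transform_alt]; simp only [List.length_map, List.length_range]; omega)]

-- ===== VERDICT (by name: the statement is the Claim_ definition above) =====
theorem transform_spec : Claim_equal_transform := by
  intro input_grid _ _
  unfold Spec_transform
  exact transform_eq input_grid
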